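-- pv_equiv track=rewrite | github.com/dplocki/advent-of-code | 2015/2015_25.py | get_code_for_ordinal_number
-- ===== SOURCE A (Python) =====
-- def get_code_for_ordinal_number(ordinal_number: int) -> int:
--
--     def code_generator():
--         prev = 20151125
--         while True:
--             yield prev
--             prev = (prev * 252533) % 33554393
--
--     generator = code_generator()
--     for _ in range(ordinal_number - 1):
--         next(generator)
--
--     return next(generator)
-- ===== SOURCE B (Python) =====
-- def get_code_for_ordinal_number(ordinal_number: int) -> int:
--     steps = max(ordinal_number - 1, 0)
--     return 20151125 * pow(252533, steps, 33554393) % 33554393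
-- ===== Notes on version B (the rewrite author's own statement) =====
-- stated objective: faster
-- what changed: replaced the step-by-step generator loop (one modular multiplication per index) with a closed form via modular exponentiation pow(252533, n-1, 33554393)
import Mathlib
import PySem

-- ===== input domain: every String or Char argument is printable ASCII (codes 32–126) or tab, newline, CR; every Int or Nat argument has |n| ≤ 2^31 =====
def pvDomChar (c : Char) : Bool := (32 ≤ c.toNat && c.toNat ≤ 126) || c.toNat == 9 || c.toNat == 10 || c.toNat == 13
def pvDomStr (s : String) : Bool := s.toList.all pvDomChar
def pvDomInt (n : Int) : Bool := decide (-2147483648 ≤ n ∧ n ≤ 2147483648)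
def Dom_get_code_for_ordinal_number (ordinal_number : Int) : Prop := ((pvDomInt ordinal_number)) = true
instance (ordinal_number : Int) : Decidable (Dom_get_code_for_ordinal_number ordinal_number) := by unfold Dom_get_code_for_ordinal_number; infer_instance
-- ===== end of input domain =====

-- B replaces A's O(n) generator loop by a closed form using modular exponentiation (objective: faster, measured).
-- All values are nonnegative and the modulus 33554393 is positive, so Lean's Int % here agrees with Python's %.


-- ===== PORT A =====
-- Port of A: iterate the generator step (prev * 252533 % 33554393) once per range element.
def get_code_for_ordinal_number (ordinal_number : Int) : Int :=
  (PySem.List.pyRange 0 (ordinal_number - 1) 1).foldl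
    (fun prev _ => prev * 252533 % 33554393) 20151125

-- ===== PORT B =====
-- binary modular exponentiation, port of Python's three-argument pow
def powmod (b e m : Nat) : Nat :=
  if h : e = 0 then 1 % m
  else
    let half := powmod b (e / 2) m
    let sq := half * half % m
    if e % 2 = 0 then sq else sq * b % m
termination_by e
decreasing_by omega

def get_code_for_ordinal_number_alt (ordinal_number : Int) : Int :=
  -- steps = max(ordinal_number - 1, 0), i.e. (ordinal_number - 1).toNat
  20151125 * (powmod 252533 (ordinal_number - 1).toNat 33554393 : Int) % 33554393

-- ===== PRECONDITION & SPEC =====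
def Spec_get_code_for_ordinal_number (ordinal_number : Int) (out : Int) : Prop := out = get_code_for_ordinal_number_alt ordinal_number
instance (ordinal_number : Int) (out : Int) : Decidable (Spec_get_code_for_ordinal_number ordinal_number out) := by unfold Spec_get_code_for_ordinal_number; infer_instance

-- ===== CLAIM (what is proved, stated in full; the proofs are below) =====
def Claim_equal_get_code_for_ordinal_number : Prop := ∀ (ordinal_number : Int), Dom_get_code_for_ordinal_number ordinal_number → Spec_get_code_for_ordinal_number ordinal_number (get_code_for_ordinal_number ordinal_number)

-- ===== LEMMAS AND PROOFS =====

-- ===== VERDICT (by name: the statement is the Claim_ definition above) =====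
theorem powmod_eq (b m : Nat) : ∀ e, powmod b e m = b ^ e % m := by
  intro e
  induction e using Nat.strong_induction_on with
  | _ e ih =>
    rw [powmod]
    split
    · simp [*]
    · rename_i he
      rw [ih (e / 2) (by omega)]
      have hsplit : e / 2 + e / 2 + e % 2 = e := by omega
      have hpow : b ^ e = b ^ (e / 2) * b ^ (e / 2) * b ^ (e % 2) := by
        rw [← pow_add, ← pow_add, hsplit]
      simp only []
      rcases Nat.mod_two_eq_zero_or_one e with h2 | h2 <;> simp [h2] <;>
        rw [hpow, h2] <;> simp [Nat.mul_mod]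

theorem emod_mul_emod (p c m : Int) : p % m * c % m = p * c % m := by
  rw [Int.mul_emod, Int.emod_emod_of_dvd _ (dvd_refl m), ← Int.mul_emod]

theorem mul_emod_emod (a x m : Int) : a * (x % m) % m = a * x % m := by
  rw [Int.mul_emod, Int.emod_emod_of_dvd _ (dvd_refl m), ← Int.mul_emod]

theorem loopA_eq (k : Nat) :
    (List.range k).foldl (fun prev _ => prev * 252533 % 33554393) (20151125 : Int)
      = 20151125 * 252533 ^ k % 33554393 := by
  induction k with
  | zero => decide
  | succ k ih =>
    rw [List.range_succ, List.foldl_append, ih]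
    simp only [List.foldl]
    rw [emod_mul_emod, pow_succ, mul_assoc]

theorem foldl_const {α : Type} (f : Int → Int) :
    ∀ (l : List α) (i : Int), l.foldl (fun p _ => f p) i = (List.range l.length).foldl (fun p _ => f p) i := by
  intro l
  induction l with
  | nil => intro i; rfl
  | cons a t ih =>
    intro i
    simp only [List.foldl, List.length_cons]
    rw [ih (f i), List.range_succ_eq_map, List.foldl_cons, List.foldl_map]

theorem get_code_for_ordinal_number_spec : Claim_equal_get_code_for_ordinal_number := by
  intro n _
  unfold Spec_get_code_for_ordinal_number get_code_for_ordinal_number get_code_for_ordinal_number_alt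
  rw [foldl_const, PySem.List.length_pyRange_one, loopA_eq, powmod_eq]
  push_cast
  rw [mul_emod_emod, Int.sub_zero]
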